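-- pv_equiv track=rewrite | github.com/HAIDEJIANG/bababot-workspace | scripts/rfq_auto/rfq_inquiry_v2.py | find_stockmarket_tab
-- ===== SOURCE A (Python) =====
-- def find_stockmarket_tab(tabs: list) -> str | None:
--     """查找 stockmarket.aero 的 tab"""
--     for tab in tabs:
--         url = tab.get("url", "")
--         if "stockmarket.aero" in url.lower() and "Welcome" in url:
--             return tab.get("targetId")
--     # 如果没有 Welcome 页，返回任意 stockmarket tab
--     for tab in tabs:
--         if "stockmarket.aero" in tab.get("url", "").lower():
--             return tab.get("targetId")
--     return None
-- ===== SOURCE B (Python) =====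
-- def find_stockmarket_tab(tabs: list) -> str | None:
--     """Single pass: return the first Welcome stockmarket tab immediately,
--     remembering the first stockmarket tab as a fallback."""
--     have_fallback = False
--     fallback = None
--     for tab in tabs:
--         url = tab.get("url", "")
--         if "stockmarket.aero" in url.lower():
--             if "Welcome" in url:
--                 return tab.get("targetId")
--             if not have_fallback:
--                 have_fallback = True
--                 fallback = tab.get("targetId")
--     return fallback
-- ===== Notes on version B (the rewrite author's own statement) =====
-- stated objective: alternative
-- what changed: Replaced A's two sequential scans of the tab list with a single scan that returns a Welcome stockmarket tab immediately and threads the first plain stockmarket tab as a fallback candidate.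
import Mathlib
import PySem

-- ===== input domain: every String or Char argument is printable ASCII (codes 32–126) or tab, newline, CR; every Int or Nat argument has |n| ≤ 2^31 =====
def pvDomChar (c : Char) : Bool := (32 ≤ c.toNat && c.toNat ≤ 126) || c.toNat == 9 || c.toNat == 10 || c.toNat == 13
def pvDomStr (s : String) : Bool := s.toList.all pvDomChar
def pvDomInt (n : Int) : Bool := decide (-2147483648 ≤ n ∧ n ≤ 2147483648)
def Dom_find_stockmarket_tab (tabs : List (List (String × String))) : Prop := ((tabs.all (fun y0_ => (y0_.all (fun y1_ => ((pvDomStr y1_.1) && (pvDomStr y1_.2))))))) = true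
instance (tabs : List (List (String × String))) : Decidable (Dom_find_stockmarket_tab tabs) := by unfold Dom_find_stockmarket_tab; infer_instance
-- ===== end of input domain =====

-- B replaces A's two sequential scans with one pass that threads a fallback candidate (alternative decomposition, same cost).


-- ===== PORT A =====
-- tab.get(key): first-match lookup in the association list (the dict convention)
def tabGet (tab : List (String × String)) (key : String) : Option String :=
  match tab with
  | [] => none
  | (k, v) :: rest => if k == key then some v else tabGet rest key

-- first loop of A: returns some r when the loop body executes 'return r'
def loopA1 (tabs : List (List (String × String))) : Option (Option String) :=
  match tabs with
  | [] => none
  | tab :: rest =>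
      let url := (tabGet tab "url").getD ""
      if PySem.Str.isIn "stockmarket.aero" (PySem.Str.lower url) && PySem.Str.isIn "Welcome" url then
        some (tabGet tab "targetId")
      else loopA1 rest

-- second loop of A
def loopA2 (tabs : List (List (String × String))) : Option (Option String) :=
  match tabs with
  | [] => none
  | tab :: rest =>
      if PySem.Str.isIn "stockmarket.aero" (PySem.Str.lower ((tabGet tab "url").getD "")) then
        some (tabGet tab "targetId")
      else loopA2 rest

def find_stockmarket_tab (tabs : List (List (String × String))) : Option String :=
  match loopA1 tabs with
  | some r => r
  | none =>
      match loopA2 tabs with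
      | some r => r
      | none => none

-- ===== PORT B =====
-- one pass; fb = none means 'have_fallback = False', fb = some v means fallback = v
def loopB (tabs : List (List (String × String))) (fb : Option (Option String)) : Option String :=
  match tabs with
  | [] => (fb.getD none)
  | tab :: rest =>
      let url := (tabGet tab "url").getD ""
      if PySem.Str.isIn "stockmarket.aero" (PySem.Str.lower url) then
        if PySem.Str.isIn "Welcome" url then tabGet tab "targetId"
        else loopB rest (if fb.isNone then some (tabGet tab "targetId") else fb)
      else loopB rest fb

def find_stockmarket_tab_alt (tabs : List (List (String × String))) : Option String :=
  loopB tabs none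

-- ===== PRECONDITION & SPEC =====
def Spec_find_stockmarket_tab (tabs : List (List (String × String))) (out : Option String) : Prop := out = find_stockmarket_tab_alt tabs
instance (tabs : List (List (String × String))) (out : Option String) : Decidable (Spec_find_stockmarket_tab tabs out) := by unfold Spec_find_stockmarket_tab; infer_instance

-- ===== CLAIM (what is proved, stated in full; the proofs are below) =====
def Claim_equal_find_stockmarket_tab : Prop := ∀ (tabs : List (List (String × String))), Dom_find_stockmarket_tab tabs → Spec_find_stockmarket_tab tabs (find_stockmarket_tab tabs)

-- ===== LEMMAS AND PROOFS =====
-- invariant of B's single pass: the fallback candidate stands in for A's second scan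
theorem loopB_eq (tabs : List (List (String × String))) (fb : Option (Option String)) :
    loopB tabs fb =
      match loopA1 tabs with
      | some r => r
      | none =>
          match fb with
          | some v => v
          | none => match loopA2 tabs with
                    | some r => r
                    | none => none := by
  induction tabs generalizing fb with
  | nil => cases fb <;> simp [loopB, loopA1, loopA2]
  | cons tab rest ih =>
      by_cases hs : PySem.Str.isIn "stockmarket.aero" (PySem.Str.lower ((tabGet tab "url").getD "")) = true <;>
        by_cases hw : PySem.Str.isIn "Welcome" ((tabGet tab "url").getD "") = true <;>
          cases fb <;> simp_all [loopB, loopA1, loopA2]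

-- ===== VERDICT (by name: the statement is the Claim_ definition above) =====
theorem find_stockmarket_tab_spec : Claim_equal_find_stockmarket_tab := by
  intro tabs _
  unfold Spec_find_stockmarket_tab find_stockmarket_tab find_stockmarket_tab_alt
  rw [loopB_eq]
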